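-- pv_equiv track=rewrite | github.com/0xStryK3R/Scaler-DSA-Revision | python/Day-42/HW_4.py | solve
-- ===== SOURCE A (Python) =====
-- def solve(A):
--     freq_map = {}
--     for num in A:
--         freq_map[num] = freq_map.get(num, 0) + 1
--
--     cnt = 0
--     freq_arr = list(freq_map.values())
--     freq_arr.sort()
--
--     for num in sorted(freq_map.keys()):
--         freq = freq_map[num]
--         if freq > 1:
--             freq -= 1
--             cnt += freq
--             i = num + 1
--             while freq and i not in freq_map:
--                 freq -= 1
--                 cnt += freq
--                 i += 1
--             if freq:
--                 freq_map[i] += freq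
--                 freq = 0
--                 cnt += freq
--
--     return cnt
-- ===== SOURCE B (Python) =====
-- def solve(A):
--     arr = sorted(A)
--     if not arr:
--         return 0
--     cnt = 0
--     prev = arr[0]
--     for x in arr[1:]:
--         if x <= prev:
--             cnt += prev + 1 - x
--             prev += 1
--         else:
--             prev = x
--     return cnt
-- ===== Notes on version B (the rewrite author's own statement) =====
-- stated objective: simpler
-- what changed: Replaced the frequency-map construction with rightward slot-walking and carry-merging over dict keys by the classic sort-and-bump single pass: sort the values, keep a running 'prev' occupied position, and raise each colliding element to prev+1, summing the increments.
import Mathlib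
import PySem

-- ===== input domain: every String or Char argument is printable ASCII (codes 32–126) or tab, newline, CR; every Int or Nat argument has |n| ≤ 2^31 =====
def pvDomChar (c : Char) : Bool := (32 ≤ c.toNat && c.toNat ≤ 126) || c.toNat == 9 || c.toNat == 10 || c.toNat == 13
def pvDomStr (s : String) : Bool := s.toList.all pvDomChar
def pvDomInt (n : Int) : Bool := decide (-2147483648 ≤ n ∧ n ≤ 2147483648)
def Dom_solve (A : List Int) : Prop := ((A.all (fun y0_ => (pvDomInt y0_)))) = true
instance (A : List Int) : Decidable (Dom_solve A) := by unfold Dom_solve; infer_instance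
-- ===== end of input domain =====

-- B replaces A's frequency-dict with slot-walking/carry-merging by the classic
-- sort-and-bump single pass (simpler); same return value on every input.

-- ===== PORT A =====
-- A's inner 'while freq and i not in freq_map' loop; freq is carried as a Nat
-- (in A it is always ≥ 0 at this point, and Python counts it down to 0 the same way).
def solveInner (fm : PySem.Dict Int Int) : Nat → Int → Int → Nat × Int × Int
  | 0, cnt, i => (0, cnt, i)
  | f + 1, cnt, i =>
    if fm.contains i then (f + 1, cnt, i)
    else solveInner fm f (cnt + (f : Int)) (i + 1)

-- one iteration of A's 'for num in sorted(freq_map.keys())' loop; state = (freq_map, cnt).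
-- freq_map[num] is read with default 0 (num is always a present key, so Python's [] cannot raise);
-- 'freq_map[i] += freq' is modify with default 0 (i is a present key there); the final
-- 'freq = 0; cnt += freq' adds 0 and leaves cnt unchanged.
def solveOuterStep (st : PySem.Dict Int Int × Int) (num : Int) : PySem.Dict Int Int × Int :=
  let fm := st.1
  let freq := fm.getD num 0
  if freq > 1 then
    let cnt := st.2 + (freq - 1)
    let r := solveInner fm (freq - 1).toNat cnt (num + 1)
    if r.1 ≠ 0 then (fm.modify r.2.2 0 (· + (r.1 : Int)), r.2.1)
    else (fm, r.2.1)
  else st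

def solve (A : List Int) : Int :=
  let fm := A.foldl (fun d n => d.insert n (d.getD n 0 + 1)) PySem.Dict.empty
  let _freqArr := PySem.List.sorted fm.values (fun x => x) false  -- freq_arr: built and sorted by A, unused by its result
  ((PySem.List.sorted fm.keys (fun x => x) false).foldl solveOuterStep (fm, 0)).2

-- ===== PORT B =====
-- one iteration of B's loop; state = (cnt, prev)
def bstep (st : Int × Int) (x : Int) : Int × Int :=
  if x ≤ st.2 then (st.1 + (st.2 + 1 - x), st.2 + 1) else (st.1, x)

def solve_alt (A : List Int) : Int :=
  match PySem.List.sorted A (fun x => x) false with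
  | [] => 0
  | p :: rest => (rest.foldl bstep (0, p)).1

-- ===== PRECONDITION & SPEC =====
def Spec_solve (A : List Int) (out : Int) : Prop := out = solve_alt A
instance (A : List Int) (out : Int) : Decidable (Spec_solve A out) := by unfold Spec_solve; infer_instance

-- ===== CLAIM (what is proved, stated in full; the proofs are below) =====
def Claim_equal_solve : Prop := ∀ (A : List Int), Dom_solve A → Spec_solve A (solve A)

-- ===== LEMMAS AND PROOFS =====

-- T n = 0 + 1 + ... + (n-1), the cost of bumping n colliding duplicates into free slots
def T : Nat → Int
  | 0 => 0
  | n + 1 => T n + n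

theorem T_add (a b : Nat) : T (a + b) = T a + T b + (a : Int) * b := by
  induction b with
  | zero => simp [T]
  | succ b ih =>
    have : a + (b + 1) = (a + b) + 1 := by omega
    rw [this]
    simp only [T, ih]
    push_cast
    ring

theorem T_le_one (n : Nat) (h : n ≤ 1) : T n = 0 := by
  interval_cases n <;> simp [T]

-- A's inner walk when no key blocks the window [i, i+e)
theorem solveInner_free (fm : PySem.Dict Int Int) :
    ∀ (e : Nat) (cnt i : Int),
      (∀ t : Int, i ≤ t → t < i + e → fm.contains t = false) →
      solveInner fm e cnt i = (0, cnt + T e, i + e) := by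
  intro e
  induction e with
  | zero => intro cnt i h; simp [solveInner, T]
  | succ f ih =>
    intro cnt i h
    rw [solveInner, h i (le_refl i) (by push_cast; omega),
      ih (cnt + f) (i + 1) (fun t ht1 ht2 => h t (by omega) (by push_cast at ht2 ⊢; omega))]
    refine Prod.ext rfl (Prod.ext ?_ ?_) <;> simp [T] <;> ring

-- A's inner walk when the first key at/after i is w and it is reached (w - i < e)
theorem solveInner_blocked (fm : PySem.Dict Int Int) (w : Int)
    (hw : fm.contains w = true) :
    ∀ (e : Nat) (cnt i : Int), i ≤ w → (w - i : Int) < e →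
      (∀ t : Int, i ≤ t → t < w → fm.contains t = false) →
      solveInner fm e cnt i
        = (e - (w - i).toNat, cnt + (T e - T (e - (w - i).toNat)), w) := by
  intro e
  induction e with
  | zero => intro cnt i h1 h2 h3; omega
  | succ f ih =>
    intro cnt i h1 h2 h3
    rcases eq_or_lt_of_le h1 with rfl | hlt
    · rw [solveInner, if_pos hw]
      simp
    · rw [solveInner, if_neg (by rw [h3 i (le_refl i) hlt]; simp),
        ih (cnt + f) (i + 1) (by omega) (by push_cast at h2 ⊢; omega)
          (fun t ht1 ht2 => h3 t (by omega) ht2)]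
      have hs : (w - i).toNat = (w - (i+1)).toNat + 1 := by omega
      have hle : (w - (i+1)).toNat + 1 ≤ f + 1 := by
        push_cast at h2; omega
      refine Prod.ext (by omega) (Prod.ext ?_ rfl)
      rw [hs]
      have h4 : f + 1 - ((w - (i+1)).toNat + 1) = f - (w - (i+1)).toNat := by omega
      have h5 : f - (w - (i + 1)).toNat = f - (w - (i+1)).toNat := rfl
      rw [h4]
      show cnt + ↑f + (T f - T (f - (w - (i + 1)).toNat)) = cnt + (T (f+1) - T (f - (w - (i + 1)).toNat))
      simp [T]; ring

-- B over a block of c equal values v, when v ≤ prev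
theorem bump_le : ∀ (c : Nat) (cnt prev v : Int), v ≤ prev →
    (List.replicate c v).foldl bstep (cnt, prev)
      = (cnt + (c : Int) * (prev + 1 - v) + T c, prev + c) := by
  intro c
  induction c with
  | zero => intro cnt prev v h; simp [T]
  | succ c ih =>
    intro cnt prev v h
    rw [List.replicate_succ, List.foldl_cons]
    show (List.replicate c v).foldl bstep (bstep (cnt, prev) v) = _
    rw [bstep, if_pos h, ih _ _ _ (by omega)]
    refine Prod.ext ?_ (by omega)
    show cnt + (prev + 1 - v) + ↑c * (prev + 1 + 1 - v) + T c = cnt + (↑c+1) * (prev + 1 - v) + T (c+1)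
    simp [T]; ring

-- B over a block of c equal values v, uniform form via r = max(0, prev+1-v)
theorem bump_group (c : Nat) (cnt prev v : Int) :
    (List.replicate c v).foldl bstep (cnt, prev)
      = (cnt + (c : Int) * (((prev + 1 - v).toNat : Nat) : Int) + T c,
         if c = 0 then prev else v + ((prev + 1 - v).toNat : Int) + c - 1) := by
  rcases Nat.eq_zero_or_pos c with rfl | hc
  · simp [T]
  by_cases h : v ≤ prev
  · rw [bump_le c cnt prev v h]
    have : ((prev + 1 - v).toNat : Int) = prev + 1 - v := by omega
    rw [this, if_neg (by omega)]
    refine Prod.ext rfl (by simp; omega)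
  · have h : prev < v := by omega
    -- prev < v : first element resets prev to v, rest are c-1 collisions
    obtain ⟨c', rfl⟩ : ∃ c', c = c' + 1 := ⟨c - 1, by omega⟩
    rw [List.replicate_succ, List.foldl_cons]
    show (List.replicate c' v).foldl bstep (bstep (cnt, prev) v) = _
    rw [bstep, if_neg (by omega), bump_le c' cnt v v (le_refl v)]
    have h0 : ((prev + 1 - v).toNat : Int) = 0 := by omega
    rw [h0, if_neg (by omega)]
    refine Prod.ext ?_ (by push_cast; ring)
    show cnt + ↑c' * (v + 1 - v) + T c' = cnt + (↑c'+1) * 0 + T (c' + 1)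
    simp [T]; ring

-- the invariant tying A's fold state (dict, cnt) to B's fold state (cnt, prev),
-- parametrised by the block counts cN; the head key carries r = max(0, prev+1-v) merged duplicates
def BumpInv (cN : Int → Nat) : List Int → PySem.Dict Int Int → Int → Int → Int → Prop
  | [], _, cntA, cntB, _ => cntB = cntA
  | v :: ktail, fm, cntA, cntB, prev =>
      cntB = cntA + T ((prev + 1 - v).toNat) ∧
      fm.getD v 0 = (cN v : Int) + (((prev + 1 - v).toNat : Nat) : Int) ∧
      (∀ k ∈ ktail, fm.getD k 0 = (cN k : Int))

-- the central lemma: A's fold over the sorted keys equals B's fold over the value blocks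
theorem main_fold (SL : List Int) (cN : Int → Nat) :
    ∀ (ks : List Int) (fm : PySem.Dict Int Int) (cntA cntB prev : Int),
      (∀ k : Int, fm.contains k = decide (k ∈ SL)) →
      ks.Pairwise (· < ·) →
      (∀ k ∈ ks, k ∈ SL) →
      (∀ k ∈ SL, k ∉ ks → ∀ j ∈ ks, k < j) →
      BumpInv cN ks fm cntA cntB prev →
      (ks.foldl solveOuterStep (fm, cntA)).2
        = ((ks.flatMap (fun v => List.replicate (cN v) v)).foldl bstep (cntB, prev)).1 := by
  intro ks
  induction ks with
  | nil =>
    intro fm cntA cntB prev _ _ _ _ hinv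
    simpa [BumpInv] using hinv.symm
  | cons v ktail ih =>
    intro fm cntA cntB prev hcont hpair hmem hout hinv
    obtain ⟨hB, hgv, htail⟩ := hinv
    set r : Nat := (prev + 1 - v).toNat with hr
    set c : Nat := cN v with hc
    have hfreq : fm.getD v 0 = ((c + r : Nat) : Int) := by rw [hgv]; push_cast; ring
    -- B-side: consume the block of the head key
    rw [List.flatMap_cons, List.foldl_append, bump_group, List.foldl_cons]
    set prev' : Int := if c = 0 then prev else v + ((prev + 1 - v).toNat : Int) + c - 1 with hprev'def
    set cntB' : Int := cntB + (c : Int) * (((prev + 1 - v).toNat : Nat) : Int) + T c with hcntB'def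
    -- shared hypotheses for the tail
    have hpair' : ktail.Pairwise (· < ·) := (List.pairwise_cons.mp hpair).2
    have hvlt : ∀ j ∈ ktail, v < j := (List.pairwise_cons.mp hpair).1
    have hmem' : ∀ k ∈ ktail, k ∈ SL := fun k hk => hmem k (List.mem_cons_of_mem _ hk)
    have hout' : ∀ k ∈ SL, k ∉ ktail → ∀ j ∈ ktail, k < j := by
      intro k hk hkn j hj
      by_cases hkv : k ∈ v :: ktail
      · have : k = v := by rcases List.mem_cons.mp hkv with h | h; exact h; exact absurd h hkn
        subst this; exact hvlt j hj
      · exact hout k hk hkv j (List.mem_cons_of_mem _ hj)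
    have hmemS : ∀ t : Int, v < t → t ∈ SL → t ∈ ktail := by
      intro t ht hS
      by_cases h : t ∈ v :: ktail
      · rcases List.mem_cons.mp h with h | h
        · omega
        · exact h
      · exact absurd (hout t hS h v (List.mem_cons_self ..)) (by omega)
    have hcontf : ∀ t : Int, v < t → t ∉ ktail → fm.contains t = false := by
      intro t ht htn
      rw [hcont t]
      simp only [decide_eq_false_iff_not]
      exact fun hS => htn (hmemS t ht hS)
    by_cases hf1 : c + r ≤ 1
    · -- head frequency ≤ 1 : A does nothing
      have hstep : solveOuterStep (fm, cntA) v = (fm, cntA) := by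
        simp only [solveOuterStep, hfreq]
        rw [if_neg (by push_cast; omega)]
      rw [hstep]
      have hcr0 : (c : Int) * (((prev + 1 - v).toNat : Nat) : Int) = 0 := by
        rcases (by omega : c = 0 ∨ r = 0) with h | h <;> rw [hr] at * <;> simp [h]
      apply ih fm cntA cntB' prev' hcont hpair' hmem' hout'
      cases ktail with
      | nil =>
        show cntB' = cntA
        rw [hcntB'def, hcr0, hB, T_le_one c (by omega), T_le_one r (by omega)]; ring
      | cons v' rest =>
        have hvv' : v < v' := hvlt v' (List.mem_cons_self ..)
        have hprevlt : prev' < v' := by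
          rw [hprev'def]
          by_cases h : c = 0
          · rw [if_pos h]; omega
          · rw [if_neg h]; omega
        refine ⟨?_, ?_, fun k hk => htail k (List.mem_cons_of_mem _ hk)⟩
        · rw [hcntB'def, hcr0, hB, T_le_one c (by omega), T_le_one r (by omega),
            T_le_one ((prev' + 1 - v').toNat) (by omega)]
          ring
        · rw [htail v' (List.mem_cons_self ..)]
          have : ((prev' + 1 - v').toNat : Int) = 0 := by omega
          rw [this]; ring
    · -- head frequency ≥ 2
      set e : Nat := c + r - 1 with he
      have hfe : ((c + r : Nat) : Int) - 1 = (e : Int) := by push_cast; omega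
      have htoNat : (fm.getD v 0 - 1).toNat = e := by rw [hfreq]; omega
      have hTsplit : T (c + r) = T c + T r + (c : Int) * r := T_add c r
      have hTe : T (c + r) = T e + e := by
        have h1 : c + r = e + 1 := by omega
        rw [h1]; simp [T]
      have hcr : (c : Int) * (((prev + 1 - v).toNat : Nat) : Int) = (c : Int) * r := by rw [hr]
      have hprevE : prev' = v + (e : Int) := by
        rw [hprev'def]
        by_cases h : c = 0
        · rw [if_pos h]
          have hrge : 2 ≤ r := by omega
          have : ((prev + 1 - v).toNat : Int) = prev + 1 - v := by omega
          rw [hr] at *; omega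
        · rw [if_neg h]; omega
      cases ktail with
      | nil =>
        have hwin : ∀ t : Int, v + 1 ≤ t → t < v + 1 + (e : Int) → fm.contains t = false :=
          fun t h1 _ => hcontf t (by omega) (by simp)
        have hstep : solveOuterStep (fm, cntA) v = (fm, cntA + (e : Int) + T e) := by
          simp only [solveOuterStep, hfreq]
          rw [if_pos (by push_cast; omega)]
          simp only [hfe, Int.toNat_natCast]
          rw [solveInner_free fm e (cntA + (e : Int)) (v + 1) hwin]
          simp
        rw [hstep]
        simp only [List.flatMap_nil, List.foldl_nil]
        rw [hcntB'def, hcr, hB]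
        have := hTsplit; have := hTe
        linarith
      | cons v' rest =>
        have hvv' : v < v' := hvlt v' (List.mem_cons_self ..)
        have hv'SL : v' ∈ SL := hmem' v' (List.mem_cons_self ..)
        have hminkt : ∀ j ∈ v' :: rest, v' ≤ j := by
          intro j hj
          rcases List.mem_cons.mp hj with h | h
          · omega
          · exact le_of_lt ((List.pairwise_cons.mp hpair').1 j h)
        have hwin : ∀ t : Int, v < t → t < v' → fm.contains t = false := by
          intro t h1 h2
          exact hcontf t h1 (fun hin => absurd (hminkt t hin) (by omega))
        by_cases hblock : (v' - (v + 1) : Int) < (e : Int)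
        · -- blocked at v' : leftover merges into v'
          have hcv' : fm.contains v' = true := by
            rw [hcont v']
            simpa using hv'SL
          set s : Nat := (v' - (v + 1)).toNat with hs
          have hsv : (s : Int) = v' - v - 1 := by omega
          have hslt : s < e := by omega
          have hinner := solveInner_blocked fm v' hcv' e (cntA + (e : Int)) (v + 1)
            (by omega) hblock (fun t h1 h2 => hwin t (by omega) h2)
          have hstep : solveOuterStep (fm, cntA) v
              = (fm.modify v' 0 (· + ((e - s : Nat) : Int)), cntA + (e : Int) + (T e - T (e - s))) := by
            simp only [solveOuterStep, hfreq]
            rw [if_pos (by push_cast; omega)]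
            simp only [hfe, Int.toNat_natCast]
            rw [hinner]
            simp only [← hs]
            rw [if_pos (by omega)]
          rw [hstep]
          set fm' := fm.modify v' 0 (· + ((e - s : Nat) : Int)) with hfm'
          have hcont2 : ∀ k : Int, fm'.contains k = decide (k ∈ SL) := by
            intro k
            rw [hfm', PySem.Dict.contains_modify, hcont k]
            by_cases h : k = v'
            · subst h
              simp [hv'SL]
            · simp [h]
          apply ih fm' (cntA + (e : Int) + (T e - T (e - s))) cntB' prev' hcont2 hpair' hmem' hout'
          have hr'' : (prev' + 1 - v').toNat = e - s := by
            rw [hprevE] at *; omega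
          refine ⟨?_, ?_, ?_⟩
          · rw [hcntB'def, hcr, hB, hr'']
            have := hTsplit; have := hTe
            linarith
          · rw [hr'', hfm', PySem.Dict.getD_modify_self,
              htail v' (List.mem_cons_self ..)]
          · intro k hk
            rw [hfm', PySem.Dict.getD_modify_of_ne _ _ _
              (by have := (List.pairwise_cons.mp hpair').1 k hk; omega)]
            exact htail k (List.mem_cons_of_mem _ hk)
        · -- free run : all duplicates settle before v'
          have hwin2 : ∀ t : Int, v + 1 ≤ t → t < v + 1 + (e : Int) → fm.contains t = false :=
            fun t h1 h2 => hwin t (by omega) (by omega)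
          have hstep : solveOuterStep (fm, cntA) v = (fm, cntA + (e : Int) + T e) := by
            simp only [solveOuterStep, hfreq]
            rw [if_pos (by push_cast; omega)]
            simp only [hfe, Int.toNat_natCast]
            rw [solveInner_free fm e (cntA + (e : Int)) (v + 1) hwin2]
            simp
          rw [hstep]
          apply ih fm (cntA + (e : Int) + T e) cntB' prev' hcont hpair' hmem' hout'
          have hr'' : (prev' + 1 - v').toNat = 0 := by
            rw [hprevE] at *; omega
          refine ⟨?_, ?_, fun k hk => htail k (List.mem_cons_of_mem _ hk)⟩
          · rw [hcntB'def, hcr, hB, hr'', T_le_one 0 (by omega)]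
            have := hTsplit; have := hTe
            linarith
          · rw [hr'', htail v' (List.mem_cons_self ..)]
            ring

theorem count_flatMap_replicate (g : Int → Nat) :
    ∀ (ks : List Int), ks.Nodup → ∀ w : Int,
      (ks.flatMap (fun v => List.replicate (g v) v)).count w = if w ∈ ks then g w else 0 := by
  intro ks
  induction ks with
  | nil => simp
  | cons v ktail ih =>
    intro hnd w
    rw [List.flatMap_cons, List.count_append, List.count_replicate,
      ih (List.nodup_cons.mp hnd).2 w]
    by_cases hw : w = v
    · subst hw
      simp [List.nodup_cons.mp hnd |>.1]
    · simp only [List.mem_cons, beq_iff_eq]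
      rw [if_neg (fun h : v = w => absurd h.symm hw)]
      by_cases h2 : w ∈ ktail <;> simp [h2, hw]

theorem pairwise_flatMap_replicate (g : Int → Nat) :
    ∀ (ks : List Int), ks.Pairwise (· < ·) →
      (ks.flatMap (fun v => List.replicate (g v) v)).Pairwise (· ≤ ·) := by
  intro ks
  induction ks with
  | nil => simp
  | cons v ktail ih =>
    intro hp
    rw [List.flatMap_cons]
    rw [List.pairwise_append]
    refine ⟨List.pairwise_replicate.mpr (by simp), ih (List.pairwise_cons.mp hp).2, ?_⟩
    intro a ha b hb
    have ha' := List.eq_of_mem_replicate ha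
    obtain ⟨k, hk, hbk⟩ := List.mem_flatMap.mp hb
    have := (List.pairwise_cons.mp hp).1 k hk
    have := List.eq_of_mem_replicate hbk
    omega

-- sorted(A) is the concatenation of the count-blocks over the sorted distinct values
theorem sorted_eq_flatMap (A : List Int) :
    PySem.List.sorted A (fun x => x) false
      = (PySem.List.sorted (PySem.Set.ofList A) (fun x => x) false).flatMap
          (fun v => List.replicate (A.count v) v) := by
  set ks := PySem.List.sorted (PySem.Set.ofList A) (fun x => x) false with hks
  have hperm : ks.Perm (PySem.Set.ofList A) := PySem.List.sorted_perm _ _ _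
  have hnd : ks.Nodup := hperm.nodup_iff.mpr (PySem.Set.nodup_ofList A)
  have hmem : ∀ w : Int, w ∈ ks ↔ w ∈ A := by
    intro w; rw [hperm.mem_iff, PySem.Set.mem_ofList]
  have hple : ks.Pairwise (· ≤ ·) := PySem.List.sorted_pairwise _ _
  have hplt : ks.Pairwise (· < ·) := by
    have := List.Pairwise.and hple hnd
    exact this.imp (fun h => lt_of_le_of_ne h.1 h.2)
  apply PySem.List.eq_of_perm_of_pairwise_le_of_injective (fun x : Int => x)
    (fun a b h => h)
  · rw [List.perm_iff_count]
    intro w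
    rw [(PySem.List.sorted_perm A _ _).count_eq, count_flatMap_replicate _ ks hnd w]
    by_cases h : w ∈ A
    · simp [(hmem w).mpr h]
    · simp [h, (hmem w), List.count_eq_zero.mpr h]
  · exact PySem.List.sorted_pairwise _ _
  · exact pairwise_flatMap_replicate _ _ hplt

theorem solve_eq (A : List Int) : solve A = solve_alt A := by
  have hsolve : solve A
      = ((PySem.List.sorted (PySem.Dict.counter A).keys (fun x => x) false).foldl
          solveOuterStep (PySem.Dict.counter A, 0)).2 := rfl
  set ks := PySem.List.sorted (PySem.Set.ofList A) (fun x => x) false with hksdef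
  have hperm : ks.Perm (PySem.Set.ofList A) := PySem.List.sorted_perm _ _ _
  have hnd : ks.Nodup := hperm.nodup_iff.mpr (PySem.Set.nodup_ofList A)
  have hmem : ∀ w : Int, w ∈ ks ↔ w ∈ A := by
    intro w; rw [hperm.mem_iff, PySem.Set.mem_ofList]
  have hplt : ks.Pairwise (· < ·) := by
    have := List.Pairwise.and (PySem.List.sorted_pairwise (PySem.Set.ofList A) (fun x => x)) hnd
    exact this.imp (fun h => lt_of_le_of_ne h.1 h.2)
  rw [hsolve, PySem.Dict.keys_counter, ← hksdef]
  cases hA : ks with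
  | nil =>
    have : A = [] := by
      cases A with
      | nil => rfl
      | cons a t =>
        exact absurd ((hmem a).mpr (List.mem_cons_self ..)) (by rw [hA]; simp)
    subst this
    rfl
  | cons v1 ktail =>
    have hv1A : v1 ∈ A := (hmem v1).mp (by rw [hA]; exact List.mem_cons_self ..)
    have hc1 : 1 ≤ A.count v1 := List.count_pos_iff.mpr hv1A
    set cN : Int → Nat := fun k => if k = v1 then A.count v1 - 1 else A.count k with hcN
    have hflat : (v1 :: ktail).flatMap (fun v => List.replicate (A.count v) v)
        = v1 :: (v1 :: ktail).flatMap (fun v => List.replicate (cN v) v) := by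
      rw [List.flatMap_cons, List.flatMap_cons]
      have h1 : A.count v1 = (A.count v1 - 1) + 1 := by omega
      have h2 : cN v1 = A.count v1 - 1 := by rw [hcN]; simp
      have hnd' : (v1 :: ktail).Nodup := hA ▸ hnd
      have h3 : ktail.flatMap (fun v => List.replicate (A.count v) v)
          = ktail.flatMap (fun v => List.replicate (cN v) v) := by
        rw [List.flatMap_def, List.flatMap_def]
        refine congrArg List.flatten (List.map_congr_left ?_)
        intro k hk
        have hkne : k ≠ v1 := fun h => ((List.nodup_cons.mp hnd').1 (h ▸ hk))
        rw [hcN]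
        simp [hkne]
      rw [h2, h3, h1, List.replicate_succ]
      rfl
    -- B side
    have hB : solve_alt A
        = (((v1 :: ktail).flatMap (fun v => List.replicate (cN v) v)).foldl bstep (0, v1)).1 := by
      rw [solve_alt]
      rw [sorted_eq_flatMap A, ← hksdef, hA, hflat]
    rw [hB]
    -- A side via main_fold
    apply main_fold A cN (v1 :: ktail) (PySem.Dict.counter A) 0 0 v1
    · intro k
      rw [PySem.Dict.contains_counter]
      simp
    · rw [← hA]; exact hplt
    · intro k hk; exact (hmem k).mp (by rw [hA]; exact hk)
    · intro k hk hkn j hj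
      exact absurd ((hmem k).mpr hk) (by rw [hA]; exact hkn)
    · refine ⟨?_, ?_, ?_⟩
      · have : ((v1 + 1 - v1).toNat) = 1 := by omega
        rw [this]; simp [T]
      · rw [PySem.Dict.getD_counter]
        have : ((v1 + 1 - v1).toNat) = 1 := by omega
        rw [this, hcN]; simp; omega
      · intro k hk
        rw [PySem.Dict.getD_counter, hcN]
        have hnd' : (v1 :: ktail).Nodup := hA ▸ hnd
        have hkne : k ≠ v1 := fun h => ((List.nodup_cons.mp hnd').1 (h ▸ hk))
        simp [hkne]

-- ===== VERDICT (by name: the statement is the Claim_ definition above) =====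
theorem solve_spec : Claim_equal_solve := by
  intro A _
  unfold Spec_solve
  exact solve_eq A
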